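-- pv_equiv track=rewrite | github.com/waleed996/ProductAlertsManager | app/tasks.py | get_start_end_indexes_n_parts
-- ===== SOURCE A (Python) =====
-- import math
-- from collections import namedtuple, defaultdict
-- from typing import List
--
-- BatchIndexes = namedtuple('BatchIndexes', ['start_index', 'end_index'])
--
-- def get_start_end_indexes_n_parts(records_batch_size: int, total_records: int) -> List[BatchIndexes]:
--     """
--     Get a list of start, end indexes of n parts
--
--     Note: Parts will be roughly equal, can be minor differences because of hard deleted records
--
--     :param records_batch_size: int, number of records in each part
--     :param total_records: int, total number of records
--     :return: List[BatchIndexes] , BatchIndexes = namedtuple('BatchIndexes', ['start_index', 'end_index'])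
--     """
--     number_of_parts = math.ceil(total_records / records_batch_size)
--     start_id, end_id, i = 1, 0, 0
--     all_parts_indexes = list()
--     while i < number_of_parts:
--         end_id = start_id + records_batch_size - 1
--         all_parts_indexes.append(BatchIndexes(start_index=start_id, end_index=end_id))
--         start_id = end_id
--         i += 1
--
--     return all_parts_indexes
-- ===== SOURCE B (Python) =====
-- import math
-- from collections import namedtuple
-- from typing import List
--
-- BatchIndexes = namedtuple('BatchIndexes', ['start_index', 'end_index'])
--
-- def get_start_end_indexes_n_parts(records_batch_size: int, total_records: int) -> List[BatchIndexes]: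
--     number_of_parts = math.ceil(total_records / records_batch_size)
--     step = records_batch_size - 1
--     return [BatchIndexes(start_index=1 + k * step, end_index=k * step + records_batch_size)
--             for k in range(number_of_parts)]
-- ===== Notes on version B (the rewrite author's own statement) =====
-- stated objective: simpler
-- what changed: Replaces the while loop with a loop-carried start_id/end_id accumulator by a closed-form per-part formula (start = 1 + k*(batch-1)) over range(number_of_parts), so each pair is computed independently of the previous one.
-- outside the precondition, e.g. on get_start_end_indexes_n_parts(0, 10): A raises ZeroDivisionError, B raises ZeroDivisionError
import Mathlib
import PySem

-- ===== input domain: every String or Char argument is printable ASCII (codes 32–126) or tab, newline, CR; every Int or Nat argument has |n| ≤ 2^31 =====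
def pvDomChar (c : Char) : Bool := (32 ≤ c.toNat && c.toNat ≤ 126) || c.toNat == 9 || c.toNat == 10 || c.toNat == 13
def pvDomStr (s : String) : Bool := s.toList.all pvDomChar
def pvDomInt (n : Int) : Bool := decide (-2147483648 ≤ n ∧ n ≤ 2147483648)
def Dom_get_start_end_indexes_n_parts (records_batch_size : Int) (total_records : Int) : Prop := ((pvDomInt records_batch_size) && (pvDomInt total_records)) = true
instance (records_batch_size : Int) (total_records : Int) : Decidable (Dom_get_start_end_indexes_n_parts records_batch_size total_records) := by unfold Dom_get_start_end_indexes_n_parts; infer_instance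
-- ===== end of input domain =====

-- B replaces A's loop-carried start_id accumulator by a closed-form per-part formula over range(number_of_parts); objective: simpler.

-- ===== PORT A =====
-- math.ceil(total_records / records_batch_size): on Dom (|args| ≤ 2^31) Python's float true
-- division is close enough that its ceil equals the exact integer ceiling -((-t) // b).
def pvCeilDiv (t : Int) (b : Int) : Int := -(PySem.Int.floordiv (-t) b)

-- the while loop: list built front-to-back, start_id carried; fuel = remaining iterations (number_of_parts - i)
def pvLoopA (b : Int) : Nat → Int → List (Int × Int)
  | 0, _ => []
  | Nat.succ k, s => (s, s + b - 1) :: pvLoopA b k (s + b - 1)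

def get_start_end_indexes_n_parts (records_batch_size : Int) (total_records : Int) : List (Int × Int) :=
  pvLoopA records_batch_size (pvCeilDiv total_records records_batch_size).toNat 1

-- ===== PORT B =====
def get_start_end_indexes_n_parts_alt (records_batch_size : Int) (total_records : Int) : List (Int × Int) :=
  (PySem.List.pyRange 0 (pvCeilDiv total_records records_batch_size) 1).map
    (fun k => (1 + k * (records_batch_size - 1), k * (records_batch_size - 1) + records_batch_size))

-- ===== PRECONDITION & SPEC =====
-- Pre_ excludes only records_batch_size = 0, where both Pythons raise ZeroDivisionError.
def Pre_get_start_end_indexes_n_parts (records_batch_size : Int) (total_records : Int) : Prop :=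
  records_batch_size ≠ 0
instance (records_batch_size : Int) (total_records : Int) : Decidable (Pre_get_start_end_indexes_n_parts records_batch_size total_records) := by unfold Pre_get_start_end_indexes_n_parts; infer_instance
def pvWitness_get_start_end_indexes_n_parts : Int × Int := (3, 10)

def Spec_get_start_end_indexes_n_parts (records_batch_size : Int) (total_records : Int) (out : List (Int × Int)) : Prop := out = get_start_end_indexes_n_parts_alt records_batch_size total_records
instance (records_batch_size : Int) (total_records : Int) (out : List (Int × Int)) : Decidable (Spec_get_start_end_indexes_n_parts records_batch_size total_records out) := by unfold Spec_get_start_end_indexes_n_parts; infer_instance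

-- ===== CLAIM (what is proved, stated in full; the proofs are below) =====
def Claim_equal_get_start_end_indexes_n_parts : Prop := ∀ (records_batch_size : Int) (total_records : Int), Dom_get_start_end_indexes_n_parts records_batch_size total_records → Pre_get_start_end_indexes_n_parts records_batch_size total_records → Spec_get_start_end_indexes_n_parts records_batch_size total_records (get_start_end_indexes_n_parts records_batch_size total_records)

-- ===== LEMMAS AND PROOFS =====

-- A's loop from start value s for k iterations, in closed form.
theorem pvLoopA_eq (b : Int) (k : Nat) : ∀ s : Int,
    pvLoopA b k s = (List.range k).map (fun j : Nat => (s + (j : Int) * (b - 1), s + (j : Int) * (b - 1) + b - 1)) := by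
  induction k with
  | zero => intro s; simp [pvLoopA]
  | succ k ih =>
    intro s
    rw [List.range_succ_eq_map, pvLoopA, ih]
    simp only [List.map_cons, List.map_map, Nat.cast_zero]
    refine congrArg₂ List.cons (by norm_num) ?_
    refine List.map_congr_left (fun j _ => ?_)
    simp only [Function.comp_apply, Nat.succ_eq_add_one]
    push_cast
    rw [Prod.mk.injEq]; exact ⟨by ring, by ring⟩

-- ===== VERDICT (by name: the statement is the Claim_ definition above) =====
theorem get_start_end_indexes_n_parts_spec : Claim_equal_get_start_end_indexes_n_parts := by
  intro b t _ _
  unfold Spec_get_start_end_indexes_n_parts get_start_end_indexes_n_parts get_start_end_indexes_n_parts_alt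
  rw [PySem.List.pyRange_one, pvLoopA_eq]
  simp only [Int.sub_zero, List.map_map]
  refine List.map_congr_left (fun j _ => ?_)
  simp only [Function.comp_apply]
  rw [Prod.mk.injEq]; exact ⟨by ring, by ring⟩
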